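-- pv_equiv track=rewrite | github.com/iaenolhy/wsl-process-monitor | backend/app/services/process_service.py | _classify_process
-- ===== SOURCE A (Python) =====
-- from typing import List, Dict, Any, Optional, Set
--
-- def _classify_process(process: Dict[str, Any]) -> str:
--     """分类进程类型"""
--     name = process.get("name", "").lower()
--     command = process.get("command", "").lower()
--
--     if any(sys_proc in name for sys_proc in ["systemd", "kernel", "kthread", "init"]):
--         return "system"
--     elif any(daemon in name for daemon in ["daemon", "service", "sshd", "cron"]):
--         return "daemon"
--     elif any(shell in name for shell in ["bash", "sh", "zsh", "fish"]):
--         return "shell"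
--     elif "python" in name or "node" in name or "java" in name:
--         return "application"
--     else:
--         return "user"
-- ===== SOURCE B (Python) =====
-- # B: single sliding-window scan of the name against a pattern->rank dictionary,
-- # keeping the minimum rank seen; the per-pattern substring searches disappear.
-- _PATTERN_RANK = {
--     "systemd": 0, "kernel": 0, "kthread": 0, "init": 0,
--     "daemon": 1, "service": 1, "sshd": 1, "cron": 1,
--     "bash": 2, "sh": 2, "zsh": 2, "fish": 2,
--     "python": 3, "node": 3, "java": 3,
-- }
-- _CATEGORIES = ["system", "daemon", "shell", "application", "user"]
-- _MAXPAT = 7  # length of the longest pattern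
--
-- def _classify_process(process):
--     name = process.get("name", "").lower()
--     n = len(name)
--     best = 4
--     for i in range(n):
--         for j in range(i + 1, min(i + _MAXPAT, n) + 1):
--             r = _PATTERN_RANK.get(name[i:j])
--             if r is not None and r < best:
--                 best = r
--     return _CATEGORIES[best]
-- ===== Notes on version B (the rewrite author's own statement) =====
-- stated objective: alternative
-- what changed: Instead of testing each hard-coded pattern for substring containment in an if/elif cascade, B makes one sliding-window pass over the lowered name, looking each window (length <= 7) up in a pattern->priority dictionary and keeping the minimum priority seen, then indexes a category table (the unused 'command' lookup is dropped).
import Mathlib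
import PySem

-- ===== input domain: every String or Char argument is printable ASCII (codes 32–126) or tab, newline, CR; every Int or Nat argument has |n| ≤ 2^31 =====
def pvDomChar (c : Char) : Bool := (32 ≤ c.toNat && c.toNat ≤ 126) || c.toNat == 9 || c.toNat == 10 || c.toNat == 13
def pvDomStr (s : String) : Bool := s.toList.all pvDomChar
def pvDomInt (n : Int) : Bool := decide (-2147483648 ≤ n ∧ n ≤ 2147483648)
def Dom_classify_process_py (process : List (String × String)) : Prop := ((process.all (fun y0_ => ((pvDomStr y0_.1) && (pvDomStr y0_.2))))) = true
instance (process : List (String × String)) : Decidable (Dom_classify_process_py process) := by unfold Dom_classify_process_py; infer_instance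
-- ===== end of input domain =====

-- B replaces A's per-pattern if/elif substring cascade by one sliding-window scan of the lowered
-- name against a pattern->priority dictionary, keeping the minimum priority seen (alternative,
-- similar cost); B also drops A's unused 'command' lookup.

-- ===== PORT A =====
def classify_process_py (process : List (String × String)) : String :=
  let name := PySem.Str.lower (PySem.Dict.getD (PySem.Dict.mk process) "name" "")
  let _command := PySem.Str.lower (PySem.Dict.getD (PySem.Dict.mk process) "command" "")
  if (["systemd", "kernel", "kthread", "init"] : List String).any (fun p => PySem.Str.isIn p name) then
    "system"
  else if (["daemon", "service", "sshd", "cron"] : List String).any (fun p => PySem.Str.isIn p name) then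
    "daemon"
  else if (["bash", "sh", "zsh", "fish"] : List String).any (fun p => PySem.Str.isIn p name) then
    "shell"
  else if PySem.Str.isIn "python" name || PySem.Str.isIn "node" name || PySem.Str.isIn "java" name then
    "application"
  else
    "user"

-- ===== PORT B =====
-- the _PATTERN_RANK dict of Source B
def pvPairs : List (String × Int) :=
  [("systemd", 0), ("kernel", 0), ("kthread", 0), ("init", 0),
   ("daemon", 1), ("service", 1), ("sshd", 1), ("cron", 1),
   ("bash", 2), ("sh", 2), ("zsh", 2), ("fish", 2),
   ("python", 3), ("node", 3), ("java", 3)]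

def pvRankDict : PySem.Dict String Int := PySem.Dict.mk pvPairs

-- the _CATEGORIES list of Source B
def pvCategories : List String := ["system", "daemon", "shell", "application", "user"]

def classify_process_py_alt (process : List (String × String)) : String :=
  let name := PySem.Str.lower (PySem.Dict.getD (PySem.Dict.mk process) "name" "")
  let n := PySem.Str.len name
  let best := (PySem.List.pyRange 0 n 1).foldl (fun best i =>
      (PySem.List.pyRange (i + 1) (min (i + 7) n + 1) 1).foldl (fun best j =>
        match PySem.Dict.get? pvRankDict (PySem.Str.slice name (some i) (some j)) with
        | some r => if r < best then r else best
        | none => best) best) 4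
  PySem.List.pyGetD pvCategories best "user"

-- ===== PRECONDITION & SPEC =====
def Spec_classify_process_py (process : List (String × String)) (out : String) : Prop := out = classify_process_py_alt process
instance (process : List (String × String)) (out : String) : Decidable (Spec_classify_process_py process out) := by unfold Spec_classify_process_py; infer_instance

-- ===== CLAIM (what is proved, stated in full; the proofs are below) =====
def Claim_equal_classify_process_py : Prop := ∀ (process : List (String × String)), Dom_classify_process_py process → Spec_classify_process_py process (classify_process_py process)

-- ===== LEMMAS AND PROOFS =====

-- B's inner update step, as a function of the accumulator and the current window
def pvStep (b : Int) (w : String) : Int :=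
  match PySem.Dict.get? pvRankDict w with
  | some r => if r < b then r else b
  | none => b

-- all windows name[i:j] that B's nested loops visit, in visiting order
def pvWindows (name : String) : List String :=
  (PySem.List.pyRange 0 (PySem.Str.len name) 1).flatMap (fun i =>
    (PySem.List.pyRange (i + 1) (min (i + 7) (PySem.Str.len name) + 1) 1).map (fun j =>
      PySem.Str.slice name (some i) (some j)))

lemma pv_step_le (b : Int) (w : String) : pvStep b w ≤ b := by
  unfold pvStep
  cases h : PySem.Dict.get? pvRankDict w with
  | none => exact le_refl b
  | some r => split <;> omega

lemma pv_fold_le_init (ws : List String) (b : Int) : ws.foldl pvStep b ≤ b := by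
  induction ws generalizing b with
  | nil => exact le_refl b
  | cons w ws ih => exact le_trans (ih (pvStep b w)) (pv_step_le b w)

lemma pv_fold_le_of_mem (ws : List String) (b : Int) (w : String) (r : Int)
    (hw : w ∈ ws) (hr : PySem.Dict.get? pvRankDict w = some r) : ws.foldl pvStep b ≤ r := by
  induction ws generalizing b with
  | nil => cases hw
  | cons x xs ih =>
    simp only [List.foldl_cons]
    rcases List.mem_cons.mp hw with rfl | hmem
    · have hstep : pvStep b w ≤ r := by simp only [pvStep, hr]; split <;> omega
      exact le_trans (pv_fold_le_init xs (pvStep b w)) hstep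
    · exact ih (pvStep b x) hmem

lemma pv_fold_mem (ws : List String) (b : Int) :
    ws.foldl pvStep b = b ∨ ∃ w ∈ ws, PySem.Dict.get? pvRankDict w = some (ws.foldl pvStep b) := by
  induction ws generalizing b with
  | nil => exact Or.inl rfl
  | cons x xs ih =>
    simp only [List.foldl_cons]
    rcases ih (pvStep b x) with h | ⟨w, hw, hr⟩
    · rw [h]
      cases hg : PySem.Dict.get? pvRankDict x with
      | none => left; simp [pvStep, hg]
      | some r =>
        by_cases hlt : r < b
        · right
          exact ⟨x, List.mem_cons_self .., by simp [pvStep, hg, hlt]⟩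
        · left; simp [pvStep, hg, hlt]
    · exact Or.inr ⟨w, List.mem_cons_of_mem _ hw, hr⟩

lemma pv_foldl_flatMap {α β : Type} (l : List α) (g : α → List β) (f : Int → β → Int) (init : Int) :
    (l.flatMap g).foldl f init = l.foldl (fun b a => (g a).foldl f b) init := by
  induction l generalizing init with
  | nil => rfl
  | cons x xs ih => simp [List.flatMap_cons, List.foldl_append, ih]

lemma pv_pairs_facts (p : String) (r : Int) (h : (p, r) ∈ pvPairs) :
    1 ≤ p.toList.length ∧ p.toList.length ≤ 7 ∧ 0 ≤ r ∧ r ≤ 3 := by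
  simp only [pvPairs, List.mem_cons, List.not_mem_nil, or_false, Prod.mk.injEq] at h
  rcases h with ⟨rfl, rfl⟩ | ⟨rfl, rfl⟩ | ⟨rfl, rfl⟩ | ⟨rfl, rfl⟩ | ⟨rfl, rfl⟩ | ⟨rfl, rfl⟩ |
    ⟨rfl, rfl⟩ | ⟨rfl, rfl⟩ | ⟨rfl, rfl⟩ | ⟨rfl, rfl⟩ | ⟨rfl, rfl⟩ | ⟨rfl, rfl⟩ |
    ⟨rfl, rfl⟩ | ⟨rfl, rfl⟩ | ⟨rfl, rfl⟩ <;> decide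

lemma pv_get?_mk_mem {κ ν : Type} [BEq κ] [LawfulBEq κ] (l : List (κ × ν)) (w : κ) (r : ν)
    (h : (PySem.Dict.mk l).get? w = some r) : (w, r) ∈ l := by
  induction l with
  | nil =>
    have hnone : (PySem.Dict.mk ([] : List (κ × ν))).get? w = none := rfl
    rw [hnone] at h
    simp at h
  | cons kv rest ih =>
    obtain ⟨k, v⟩ := kv
    rw [PySem.Dict.get?_mk_cons] at h
    by_cases hk : (k == w) = true
    · rw [if_pos hk] at h
      obtain rfl := eq_of_beq hk
      injection h with hv; subst hv
      exact List.mem_cons_self ..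
    · rw [if_neg hk] at h
      exact List.mem_cons_of_mem _ (ih h)

lemma pv_get?_mem (w : String) (r : Int) (h : PySem.Dict.get? pvRankDict w = some r) :
    (w, r) ∈ pvPairs :=
  pv_get?_mk_mem pvPairs w r h

lemma pv_mem_windows_infix (name w : String) (h : w ∈ pvWindows name) :
    w.toList <:+: name.toList := by
  simp only [pvWindows, List.mem_flatMap, List.mem_map] at h
  obtain ⟨i, hi, j, hj, rfl⟩ := h
  rw [PySem.List.mem_pyRange_one] at hi hj
  have h0i : 0 ≤ i := hi.1
  have h0j : 0 ≤ j := by omega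
  have hsl : (PySem.Str.slice name (some i) (some j)).toList
      = (name.toList.drop i.toNat).take (j.toNat - i.toNat) := by
    simp [PySem.Str.slice, PySem.List.slice_toNat _ h0i h0j]
  rw [hsl]
  exact (List.take_prefix _ _).isInfix.trans (List.drop_suffix _ _).isInfix

lemma pv_pat_mem_windows (name p : String) (h1 : 1 ≤ p.toList.length) (h7 : p.toList.length ≤ 7)
    (hinf : p.toList <:+: name.toList) : p ∈ pvWindows name := by
  rcases hinf with ⟨t, u, hL⟩
  have hlen : name.toList.length = t.length + p.toList.length + u.length := by
    rw [← hL]; simp [List.length_append]; omega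
  simp only [pvWindows, List.mem_flatMap, List.mem_map]
  refine ⟨(t.length : Int), ?_, ((t.length + p.toList.length : Nat) : Int), ?_, ?_⟩
  · rw [PySem.List.mem_pyRange_one, PySem.Str.len_eq]; omega
  · rw [PySem.List.mem_pyRange_one, PySem.Str.len_eq]; push_cast; omega
  · apply String.toList_inj.mp
    have hcast : ((t.length + p.toList.length : Nat) : Int)
        = (t.length : Int) + (p.toList.length : Int) := by push_cast; ring
    rw [hcast]
    have : (PySem.Str.slice name (some (t.length : Int))
        (some ((t.length : Int) + (p.toList.length : Int)))).toList
        = (name.toList.drop t.length).take p.toList.length := by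
      simp [PySem.Str.slice, PySem.List.slice_natCast_add]
    rw [this, ← hL, List.append_assoc, List.drop_left, List.take_left]

lemma pv_best_eq (name : String) :
    (PySem.List.pyRange 0 (PySem.Str.len name) 1).foldl (fun best i =>
      (PySem.List.pyRange (i + 1) (min (i + 7) (PySem.Str.len name) + 1) 1).foldl (fun best j =>
        match PySem.Dict.get? pvRankDict (PySem.Str.slice name (some i) (some j)) with
        | some r => if r < best then r else best
        | none => best) best) 4
    = (pvWindows name).foldl pvStep 4 := by
  rw [pvWindows, pv_foldl_flatMap]
  simp only [List.foldl_map]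
  rfl

lemma pv_fold_le_pat (name p : String) (r : Int)
    (h1 : 1 ≤ p.toList.length) (h7 : p.toList.length ≤ 7)
    (hget : PySem.Dict.get? pvRankDict p = some r)
    (hin : PySem.Str.isIn p name = true) :
    (pvWindows name).foldl pvStep 4 ≤ r :=
  pv_fold_le_of_mem _ _ _ _
    (pv_pat_mem_windows _ _ h1 h7 ((PySem.Str.isIn_iff_infix _ _).mp hin)) hget

lemma pv_reached (name : String) (hne : (pvWindows name).foldl pvStep 4 ≠ 4) :
    ∃ p, (p, (pvWindows name).foldl pvStep 4) ∈ pvPairs ∧ PySem.Str.isIn p name = true := by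
  rcases pv_fold_mem (pvWindows name) 4 with h | ⟨w, hw, hr⟩
  · exact absurd h hne
  · exact ⟨w, pv_get?_mem _ _ hr,
      (PySem.Str.isIn_iff_infix _ _).mpr (pv_mem_windows_infix _ _ hw)⟩

lemma pv_rank0_group (p : String) (h : (p, (0 : Int)) ∈ pvPairs) :
    p ∈ (["systemd", "kernel", "kthread", "init"] : List String) := by
  simp [pvPairs] at h
  rcases h with rfl | rfl | rfl | rfl <;> simp

lemma pv_rank1_group (p : String) (h : (p, (1 : Int)) ∈ pvPairs) :
    p ∈ (["daemon", "service", "sshd", "cron"] : List String) := by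
  simp [pvPairs] at h
  rcases h with rfl | rfl | rfl | rfl <;> simp

lemma pv_rank2_group (p : String) (h : (p, (2 : Int)) ∈ pvPairs) :
    p ∈ (["bash", "sh", "zsh", "fish"] : List String) := by
  simp [pvPairs] at h
  rcases h with rfl | rfl | rfl | rfl <;> simp

lemma pv_rank3_group (p : String) (h : (p, (3 : Int)) ∈ pvPairs) :
    p ∈ (["python", "node", "java"] : List String) := by
  simp [pvPairs] at h
  rcases h with rfl | rfl | rfl <;> simp

lemma pv_key (name : String) :
    (if (["systemd", "kernel", "kthread", "init"] : List String).any (fun p => PySem.Str.isIn p name) then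
      "system"
    else if (["daemon", "service", "sshd", "cron"] : List String).any (fun p => PySem.Str.isIn p name) then
      "daemon"
    else if (["bash", "sh", "zsh", "fish"] : List String).any (fun p => PySem.Str.isIn p name) then
      "shell"
    else if PySem.Str.isIn "python" name || PySem.Str.isIn "node" name || PySem.Str.isIn "java" name then
      "application"
    else
      "user")
    = PySem.List.pyGetD pvCategories ((pvWindows name).foldl pvStep 4) "user" := by
  have hle : (pvWindows name).foldl pvStep 4 ≤ 4 := pv_fold_le_init _ _
  have hge : 0 ≤ (pvWindows name).foldl pvStep 4 := by
    by_cases h : (pvWindows name).foldl pvStep 4 = 4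
    · omega
    · obtain ⟨p, hp, -⟩ := pv_reached name h
      exact (pv_pairs_facts _ _ hp).2.2.1
  by_cases h0 : (["systemd", "kernel", "kthread", "init"] : List String).any (fun p => PySem.Str.isIn p name) = true
  · have hb : (pvWindows name).foldl pvStep 4 = 0 := by
      obtain ⟨p, hp, hin⟩ := List.any_eq_true.mp h0
      fin_cases hp <;>
        · have := pv_fold_le_pat name _ 0 (by decide) (by decide) (by decide) hin
          omega
    rw [if_pos h0, hb]; decide
  · have hne0 : (pvWindows name).foldl pvStep 4 ≠ 0 := by
      intro h
      obtain ⟨p, hp, hin⟩ := pv_reached name (by omega)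
      rw [h] at hp
      exact h0 (List.any_eq_true.mpr ⟨p, pv_rank0_group p hp, hin⟩)
    by_cases h1 : (["daemon", "service", "sshd", "cron"] : List String).any (fun p => PySem.Str.isIn p name) = true
    · have hb : (pvWindows name).foldl pvStep 4 = 1 := by
        obtain ⟨p, hp, hin⟩ := List.any_eq_true.mp h1
        fin_cases hp <;>
          · have := pv_fold_le_pat name _ 1 (by decide) (by decide) (by decide) hin
            omega
      rw [if_neg h0, if_pos h1, hb]; decide
    · have hne1 : (pvWindows name).foldl pvStep 4 ≠ 1 := by
        intro h
        obtain ⟨p, hp, hin⟩ := pv_reached name (by omega)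
        rw [h] at hp
        exact h1 (List.any_eq_true.mpr ⟨p, pv_rank1_group p hp, hin⟩)
      by_cases h2 : (["bash", "sh", "zsh", "fish"] : List String).any (fun p => PySem.Str.isIn p name) = true
      · have hb : (pvWindows name).foldl pvStep 4 = 2 := by
          obtain ⟨p, hp, hin⟩ := List.any_eq_true.mp h2
          fin_cases hp <;>
            · have := pv_fold_le_pat name _ 2 (by decide) (by decide) (by decide) hin
              omega
        rw [if_neg h0, if_neg h1, if_pos h2, hb]; decide
      · have hne2 : (pvWindows name).foldl pvStep 4 ≠ 2 := by
          intro h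
          obtain ⟨p, hp, hin⟩ := pv_reached name (by omega)
          rw [h] at hp
          exact h2 (List.any_eq_true.mpr ⟨p, pv_rank2_group p hp, hin⟩)
        by_cases h3 : (PySem.Str.isIn "python" name || PySem.Str.isIn "node" name || PySem.Str.isIn "java" name) = true
        · have hb : (pvWindows name).foldl pvStep 4 = 3 := by
            rcases Bool.or_eq_true_iff.mp h3 with h' | hj
            · rcases Bool.or_eq_true_iff.mp h' with hp | hn
              · have := pv_fold_le_pat name "python" 3 (by decide) (by decide) (by decide) hp
                omega
              · have := pv_fold_le_pat name "node" 3 (by decide) (by decide) (by decide) hn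
                omega
            · have := pv_fold_le_pat name "java" 3 (by decide) (by decide) (by decide) hj
              omega
          rw [if_neg h0, if_neg h1, if_neg h2, if_pos h3, hb]; decide
        · have hne3 : (pvWindows name).foldl pvStep 4 ≠ 3 := by
            intro h
            obtain ⟨p, hp, hin⟩ := pv_reached name (by omega)
            rw [h] at hp
            simp only [Bool.or_eq_true, not_or] at h3
            have hmem := pv_rank3_group p hp
            fin_cases hmem
            · exact h3.1.1 hin
            · exact h3.1.2 hin
            · exact h3.2 hin
          have hb : (pvWindows name).foldl pvStep 4 = 4 := by omega
          rw [if_neg h0, if_neg h1, if_neg h2, if_neg h3, hb]; decide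

-- ===== VERDICT (by name: the statement is the Claim_ definition above) =====
theorem classify_process_py_spec : Claim_equal_classify_process_py := by
  intro process _
  unfold Spec_classify_process_py classify_process_py classify_process_py_alt
  dsimp only
  rw [pv_best_eq]
  exact pv_key _
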